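-- pv_equiv track=rewrite | github.com/Sygaro/tools | r_tools/tools/format_code.py | _py_remove_blank_before_block_followups
-- ===== SOURCE A (Python) =====
-- def _py_remove_blank_before_block_followups(lines: list[str]) -> list[str]:
--     followups = ("else:", "elif ", "except", "finally:")
--     out: list[str] = []
--     i = 0
--     n = len(lines)
--     while i < n:
--         if i + 1 < n and lines[i].strip() == "" and any(lines[i + 1].lstrip().startswith(t) for t in followups):
--             i += 1
--             continue
--         out.append(lines[i])
--         i += 1
--     return out
-- ===== SOURCE B (Python) =====
-- def _py_remove_blank_before_block_followups(lines: list[str]) -> list[str]: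
--     followups = ("else:", "elif ", "except", "finally:")
--     out: list[str] = []
--     for line in lines:
--         if out and out[-1].strip() == "" and any(line.lstrip().startswith(t) for t in followups):
--             out.pop()
--         out.append(line)
--     return out
-- ===== Notes on version B (the rewrite author's own statement) =====
-- stated objective: simpler
-- what changed: Replaced A's index-driven while loop with a one-line lookahead skip by a plain for-each pass that looks BEHIND: append every line, popping the single preceding blank when the current line is a followup.
import Mathlib
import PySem

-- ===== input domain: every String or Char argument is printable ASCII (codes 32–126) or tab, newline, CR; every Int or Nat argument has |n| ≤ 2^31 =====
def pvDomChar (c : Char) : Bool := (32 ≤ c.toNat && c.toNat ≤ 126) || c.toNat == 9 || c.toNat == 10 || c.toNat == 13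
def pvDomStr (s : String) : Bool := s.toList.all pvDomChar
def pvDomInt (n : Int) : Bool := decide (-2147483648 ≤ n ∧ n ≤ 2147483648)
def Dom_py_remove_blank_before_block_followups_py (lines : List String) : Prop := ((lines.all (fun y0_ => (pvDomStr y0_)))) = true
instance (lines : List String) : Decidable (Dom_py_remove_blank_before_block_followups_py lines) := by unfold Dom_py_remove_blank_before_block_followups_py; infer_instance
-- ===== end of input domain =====

-- ===== PORT A =====
-- B replaces A's lookahead skip (while loop over indices) by a look-behind pop pass; same return value.
-- shared helpers: the blank test `s.strip() == ""` and the followup-prefix test (identical text in A and B)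
def pvIsBlank (s : String) : Bool := PySem.Str.strip s == ""
def pvIsFollowup (s : String) : Bool :=
  (["else:", "elif ", "except", "finally:"]).any
    (fun t => PySem.Str.startswith (PySem.Str.lstrip s) t)

-- the while loop of A, as structural recursion with the same one-line lookahead
def pyGoA : List String → List String
  | [] => []
  | [x] => [x]
  | x :: y :: rest =>
    if pvIsBlank x && pvIsFollowup y then pyGoA (y :: rest)
    else x :: pyGoA (y :: rest)

def py_remove_blank_before_block_followups_py (lines : List String) : List String :=
  pyGoA lines

-- ===== PORT B =====
-- one step of B's for-each pass: `out[-1]` ported as getLastD under the non-empty guard, `pop` as dropLast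
def pvStepB (out : List String) (line : String) : List String :=
  if !out.isEmpty && pvIsBlank (out.getLastD "") && pvIsFollowup line
  then out.dropLast ++ [line]
  else out ++ [line]

def py_remove_blank_before_block_followups_py_alt (lines : List String) : List String :=
  lines.foldl pvStepB []

-- ===== PRECONDITION & SPEC =====
def Spec_py_remove_blank_before_block_followups_py (lines : List String) (out : List String) : Prop := out = py_remove_blank_before_block_followups_py_alt lines
instance (lines : List String) (out : List String) : Decidable (Spec_py_remove_blank_before_block_followups_py lines out) := by unfold Spec_py_remove_blank_before_block_followups_py; infer_instance

-- ===== CLAIM (what is proved, stated in full; the proofs are below) =====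
def Claim_equal_py_remove_blank_before_block_followups_py : Prop := ∀ (lines : List String), Dom_py_remove_blank_before_block_followups_py lines → Spec_py_remove_blank_before_block_followups_py lines (py_remove_blank_before_block_followups_py lines)

-- ===== LEMMAS AND PROOFS =====
-- B's step only inspects and removes the LAST element of the accumulator, so a prefix factors out.
theorem pvStepB_factor (ls acc : List String) (x : String) :
    List.foldl pvStepB (acc ++ [x]) ls = acc ++ List.foldl pvStepB [x] ls := by
  induction ls generalizing acc x with
  | nil => simp
  | cons y rest ih =>
    simp only [List.foldl_cons]
    by_cases h : pvIsBlank x && pvIsFollowup y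
    · rw [Bool.and_eq_true] at h
      have h1 : pvStepB (acc ++ [x]) y = acc ++ [y] := by
        simp [pvStepB, h.1, h.2]
      have h2 : pvStepB [x] y = [y] := by
        simp [pvStepB, h.1, h.2]
      rw [h1, h2]
      cases acc with
      | nil => simp
      | cons a as =>
        have := ih (acc := a :: as) (x := y)
        simpa using this
    · simp only [Bool.and_eq_true, not_and] at h
      have hkey : pvIsBlank x = true → pvIsFollowup y = false := by
        intro hb; simpa using h hb
      have h1 : pvStepB (acc ++ [x]) y = (acc ++ [x]) ++ [y] := by
        simp [pvStepB]; exact hkey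
      have h2 : pvStepB [x] y = [x] ++ [y] := by
        simp [pvStepB]; exact hkey
      rw [h1, h2, ih, ih]
      simp

theorem pyGoA_eq_foldl (ls : List String) (x : String) :
    pyGoA (x :: ls) = List.foldl pvStepB [x] ls := by
  induction ls generalizing x with
  | nil => simp [pyGoA]
  | cons y rest ih =>
    simp only [List.foldl_cons]
    by_cases h : pvIsBlank x && pvIsFollowup y
    · rw [Bool.and_eq_true] at h
      have h2 : pvStepB [x] y = [y] := by simp [pvStepB, h.1, h.2]
      rw [h2, ← ih]
      simp [pyGoA, h.1, h.2]
    · have h2 : pvStepB [x] y = [x] ++ [y] := by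
        simp only [Bool.and_eq_true, not_and] at h
        simp [pvStepB]
        intro hb; simpa using h hb
      rw [h2, pvStepB_factor, ← ih]
      simp [pyGoA, h]

-- ===== VERDICT (by name: the statement is the Claim_ definition above) =====
theorem py_remove_blank_before_block_followups_py_spec : Claim_equal_py_remove_blank_before_block_followups_py := by
  intro lines _
  unfold Spec_py_remove_blank_before_block_followups_py
  unfold py_remove_blank_before_block_followups_py py_remove_blank_before_block_followups_py_alt
  cases lines with
  | nil => simp [pyGoA]
  | cons x ls =>
    rw [pyGoA_eq_foldl]
    rfl
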